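-- pv_equiv track=rewrite | github.com/CoconutJJ/AdventOfCode-Solutions | 2024/day8/soln.py | antinode_points_twice_distance
-- ===== SOURCE A (Python) =====
-- def antinode_points_twice_distance(width, height, antennas):
--
--     antinodes = set()
--     for x in range(width):
--         for y in range(height):
--             for antenna in antennas:
--                 for p in antennas[antenna]:
--
--                     if p == (x, y):
--                         continue
--
--                     u, v = p
--
--                     du, dv = u - x, v - y
--
--                     if (u + du, v + dv) in antennas[antenna]:
--                         antinodes.add((x, y))
--
--                     if (x - 2 * du, y - 2 * dv) in antennas[antenna]:
--                         antinodes.add((x, y))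
--
--     return len(antinodes)
-- ===== SOURCE B (Python) =====
-- def antinode_points_twice_distance(width, height, antennas):
--     antinodes = set()
--     for points in antennas.values():
--         for p in points:
--             for q in points:
--                 if p == q:
--                     continue
--                 # reflection: point at distance 2d on p's far side (q = midpoint rule)
--                 cx, cy = 2 * p[0] - q[0], 2 * p[1] - q[1]
--                 if 0 <= cx < width and 0 <= cy < height:
--                     antinodes.add((cx, cy))
--                 # trisection: point between p and q at a third of the way from p
--                 tx, ty = 2 * p[0] + q[0], 2 * p[1] + q[1]
--                 if tx % 3 == 0 and ty % 3 == 0: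
--                     tx, ty = tx // 3, ty // 3
--                     if 0 <= tx < width and 0 <= ty < height:
--                         antinodes.add((tx, ty))
--     return len(antinodes)
-- ===== Notes on version B (the rewrite author's own statement) =====
-- stated objective: faster
-- what changed: Instead of scanning every grid cell and testing each antenna against list membership (O(W*H*A*P)), B iterates over ordered same-frequency antenna pairs, computes the reflection point 2p-q and the trisection point (2p+q)/3 directly, bounds-checks them and counts the distinct results (O(A^2) per frequency).
import Mathlib
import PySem

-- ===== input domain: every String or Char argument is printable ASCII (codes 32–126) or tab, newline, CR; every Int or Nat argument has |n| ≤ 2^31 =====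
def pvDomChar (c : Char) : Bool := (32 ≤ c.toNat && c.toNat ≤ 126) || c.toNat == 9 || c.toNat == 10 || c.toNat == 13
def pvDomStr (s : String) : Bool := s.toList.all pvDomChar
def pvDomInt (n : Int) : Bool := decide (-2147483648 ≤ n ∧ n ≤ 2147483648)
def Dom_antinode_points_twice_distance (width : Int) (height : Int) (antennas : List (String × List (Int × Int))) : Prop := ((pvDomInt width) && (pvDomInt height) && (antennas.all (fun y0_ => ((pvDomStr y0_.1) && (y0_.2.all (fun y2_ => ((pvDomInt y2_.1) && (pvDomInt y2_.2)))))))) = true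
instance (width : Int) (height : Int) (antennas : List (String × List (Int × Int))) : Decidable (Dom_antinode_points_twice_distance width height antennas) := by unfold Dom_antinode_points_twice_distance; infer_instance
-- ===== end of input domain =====

-- B replaces A's scan of every grid cell by a direct enumeration of the candidate
-- antinodes of each ordered same-frequency antenna pair (reflection 2p-q and, when
-- integral, trisection (2p+q)/3), bounds-checked and deduplicated; objective: faster.


-- ===== PORT A =====
def antinode_points_twice_distance (width : Int) (height : Int) (antennas : List (String × List (Int × Int))) : Int :=
  let antinodes : PySem.Set (Int × Int) :=
    (PySem.List.pyRange 0 width 1).foldl (fun s0 x =>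
      (PySem.List.pyRange 0 height 1).foldl (fun s1 y =>
        antennas.foldl (fun s2 entry =>
          entry.2.foldl (fun s3 p =>
            if p = (x, y) then s3
            else
              let u := p.1
              let v := p.2
              let du := u - x
              let dv := v - y
              let s4 := if (u + du, v + dv) ∈ entry.2 then PySem.Set.add s3 (x, y) else s3
              if (x - 2 * du, y - 2 * dv) ∈ entry.2 then PySem.Set.add s4 (x, y) else s4)
            s2)
          s1)
        s0)
      PySem.Set.empty
  (antinodes.length : Int)

-- ===== PORT B =====
def antinode_points_twice_distance_alt (width : Int) (height : Int) (antennas : List (String × List (Int × Int))) : Int :=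
  let antinodes : PySem.Set (Int × Int) :=
    antennas.foldl (fun s0 entry =>
      entry.2.foldl (fun s1 p =>
        entry.2.foldl (fun s2 q =>
          if p = q then s2
          else
            let cx := 2 * p.1 - q.1
            let cy := 2 * p.2 - q.2
            let s3 := if 0 ≤ cx ∧ cx < width ∧ 0 ≤ cy ∧ cy < height then PySem.Set.add s2 (cx, cy) else s2
            let tx := 2 * p.1 + q.1
            let ty := 2 * p.2 + q.2
            if PySem.Int.mod tx 3 = 0 ∧ PySem.Int.mod ty 3 = 0 then
              let tx' := PySem.Int.floordiv tx 3
              let ty' := PySem.Int.floordiv ty 3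
              if 0 ≤ tx' ∧ tx' < width ∧ 0 ≤ ty' ∧ ty' < height then PySem.Set.add s3 (tx', ty') else s3
            else s3)
          s1)
        s0)
      PySem.Set.empty
  (antinodes.length : Int)


-- ===== PRECONDITION & SPEC =====
def Spec_antinode_points_twice_distance (width : Int) (height : Int) (antennas : List (String × List (Int × Int))) (out : Int) : Prop := out = antinode_points_twice_distance_alt width height antennas
instance (width : Int) (height : Int) (antennas : List (String × List (Int × Int))) (out : Int) : Decidable (Spec_antinode_points_twice_distance width height antennas out) := by unfold Spec_antinode_points_twice_distance; infer_instance

-- ===== CLAIM (what is proved, stated in full; the proofs are below) =====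
def Claim_equal_antinode_points_twice_distance : Prop := ∀ (width : Int) (height : Int) (antennas : List (String × List (Int × Int))), Dom_antinode_points_twice_distance width height antennas → Spec_antinode_points_twice_distance width height antennas (antinode_points_twice_distance width height antennas)

-- ===== LEMMAS AND PROOFS =====

theorem mem_foldl_step {β : Type} {α : Type} [BEq α] (l : List β)
    (step : PySem.Set α → β → PySem.Set α) (y : α) (C : β → Prop)
    (h : ∀ s b, y ∈ step s b ↔ y ∈ s ∨ C b) :
    ∀ s : PySem.Set α, y ∈ l.foldl step s ↔ y ∈ s ∨ ∃ b ∈ l, C b := by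
  induction l with
  | nil => simp
  | cons b l ih =>
    intro s
    simp only [List.foldl_cons, ih, h, List.mem_cons]
    constructor
    · rintro ((hy | hc) | ⟨b', hb', hc⟩)
      · exact Or.inl hy
      · exact Or.inr ⟨b, Or.inl rfl, hc⟩
      · exact Or.inr ⟨b', Or.inr hb', hc⟩
    · rintro (hy | ⟨b', (rfl | hb'), hc⟩)
      · exact Or.inl (Or.inl hy)
      · exact Or.inl (Or.inr hc)
      · exact Or.inr ⟨b', hb', hc⟩

def CondA (antennas : List (String × List (Int × Int))) (x y : Int) : Prop :=
  ∃ e ∈ antennas, ∃ p ∈ e.2, p ≠ (x, y) ∧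
    ((p.1 + (p.1 - x), p.2 + (p.2 - y)) ∈ e.2 ∨ (x - 2 * (p.1 - x), y - 2 * (p.2 - y)) ∈ e.2)

theorem memA (width height : Int) (antennas : List (String × List (Int × Int))) (z : Int × Int) :
    z ∈ ((PySem.List.pyRange 0 width 1).foldl (fun s0 x =>
      (PySem.List.pyRange 0 height 1).foldl (fun s1 y =>
        antennas.foldl (fun s2 entry =>
          entry.2.foldl (fun s3 p =>
            if p = (x, y) then s3
            else
              let u := p.1
              let v := p.2
              let du := u - x
              let dv := v - y
              let s4 := if (u + du, v + dv) ∈ entry.2 then PySem.Set.add s3 (x, y) else s3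
              if (x - 2 * du, y - 2 * dv) ∈ entry.2 then PySem.Set.add s4 (x, y) else s4)
            s2)
          s1)
        s0)
      PySem.Set.empty) ↔
    (0 ≤ z.1 ∧ z.1 < width ∧ 0 ≤ z.2 ∧ z.2 < height ∧ CondA antennas z.1 z.2) := by
  have h3 : ∀ (x y : Int) (entry : String × List (Int × Int)) (s : PySem.Set (Int × Int)) (p : Int × Int),
      z ∈ (if p = (x, y) then s
            else
              let u := p.1
              let v := p.2
              let du := u - x
              let dv := v - y
              let s4 := if (u + du, v + dv) ∈ entry.2 then PySem.Set.add s (x, y) else s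
              if (x - 2 * du, y - 2 * dv) ∈ entry.2 then PySem.Set.add s4 (x, y) else s4) ↔
      z ∈ s ∨ (z = (x, y) ∧ p ≠ (x, y) ∧
        ((p.1 + (p.1 - x), p.2 + (p.2 - y)) ∈ entry.2 ∨ (x - 2 * (p.1 - x), y - 2 * (p.2 - y)) ∈ entry.2)) := by
    intro x y entry s p
    by_cases hp : p = (x, y) <;> simp only [hp, if_true, if_false] <;> [skip; split_ifs] <;>
      simp [PySem.Set.mem_add, hp] <;> tauto
  have h2 : ∀ (x y : Int) (s : PySem.Set (Int × Int)) (entry : String × List (Int × Int)),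
      z ∈ entry.2.foldl (fun s3 p =>
            if p = (x, y) then s3
            else
              let u := p.1
              let v := p.2
              let du := u - x
              let dv := v - y
              let s4 := if (u + du, v + dv) ∈ entry.2 then PySem.Set.add s3 (x, y) else s3
              if (x - 2 * du, y - 2 * dv) ∈ entry.2 then PySem.Set.add s4 (x, y) else s4) s ↔
      z ∈ s ∨ (z = (x, y) ∧ ∃ p ∈ entry.2, p ≠ (x, y) ∧
        ((p.1 + (p.1 - x), p.2 + (p.2 - y)) ∈ entry.2 ∨ (x - 2 * (p.1 - x), y - 2 * (p.2 - y)) ∈ entry.2)) := by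
    intro x y s entry
    rw [mem_foldl_step _ _ z _ (h3 x y entry) s]
    apply or_congr Iff.rfl
    constructor
    · rintro ⟨b, hb, hz, hp⟩; exact ⟨hz, b, hb, hp⟩
    · rintro ⟨hz, b, hb, hp⟩; exact ⟨b, hb, hz, hp⟩
  have h1 : ∀ (x : Int) (s : PySem.Set (Int × Int)) (y : Int),
      z ∈ antennas.foldl (fun s2 entry =>
          entry.2.foldl (fun s3 p =>
            if p = (x, y) then s3
            else
              let u := p.1
              let v := p.2
              let du := u - x
              let dv := v - y
              let s4 := if (u + du, v + dv) ∈ entry.2 then PySem.Set.add s3 (x, y) else s3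
              if (x - 2 * du, y - 2 * dv) ∈ entry.2 then PySem.Set.add s4 (x, y) else s4) s2) s ↔
      z ∈ s ∨ (z = (x, y) ∧ CondA antennas x y) := by
    intro x s y
    rw [mem_foldl_step _ _ z _ (fun s e => h2 x y s e) s]
    unfold CondA
    apply or_congr Iff.rfl
    constructor
    · rintro ⟨e, he, hz, hp⟩; exact ⟨hz, e, he, hp⟩
    · rintro ⟨hz, e, he, hp⟩; exact ⟨e, he, hz, hp⟩
  have h0 : ∀ (s : PySem.Set (Int × Int)) (x : Int),
      z ∈ (PySem.List.pyRange 0 height 1).foldl (fun s1 y =>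
        antennas.foldl (fun s2 entry =>
          entry.2.foldl (fun s3 p =>
            if p = (x, y) then s3
            else
              let u := p.1
              let v := p.2
              let du := u - x
              let dv := v - y
              let s4 := if (u + du, v + dv) ∈ entry.2 then PySem.Set.add s3 (x, y) else s3
              if (x - 2 * du, y - 2 * dv) ∈ entry.2 then PySem.Set.add s4 (x, y) else s4)
            s2) s1) s ↔
      z ∈ s ∨ ∃ y ∈ PySem.List.pyRange 0 height 1, z = (x, y) ∧ CondA antennas x y := by
    intro s x
    rw [mem_foldl_step _ _ z _ (fun s y => h1 x s y) s]
  rw [mem_foldl_step _ _ z _ h0 PySem.Set.empty]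
  simp only [PySem.List.mem_pyRange_one, PySem.Set.empty]
  constructor
  · rintro (h | ⟨x, ⟨hx0, hxw⟩, y, ⟨hy0, hyh⟩, rfl, hc⟩)
    · simp at h
    · exact ⟨hx0, hxw, hy0, hyh, hc⟩
  · rintro ⟨h1', h2', h3', h4', hc⟩
    exact Or.inr ⟨z.1, ⟨h1', h2'⟩, z.2, ⟨h3', h4'⟩, by simp, hc⟩

theorem mem_add_ite {α : Type} [BEq α] [LawfulBEq α] (z v : α) (c : Prop) [Decidable c]
    (s : PySem.Set α) : z ∈ (if c then PySem.Set.add s v else s) ↔ z ∈ s ∨ (c ∧ z = v) := by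
  split_ifs with h <;> simp [PySem.Set.mem_add, h]

def CondB (width height : Int) (antennas : List (String × List (Int × Int))) (z : Int × Int) : Prop :=
  ∃ e ∈ antennas, ∃ p ∈ e.2, ∃ q ∈ e.2, p ≠ q ∧
    ((z = (2 * p.1 - q.1, 2 * p.2 - q.2) ∧ 0 ≤ z.1 ∧ z.1 < width ∧ 0 ≤ z.2 ∧ z.2 < height) ∨
     (PySem.Int.mod (2 * p.1 + q.1) 3 = 0 ∧ PySem.Int.mod (2 * p.2 + q.2) 3 = 0 ∧
      z = (PySem.Int.floordiv (2 * p.1 + q.1) 3, PySem.Int.floordiv (2 * p.2 + q.2) 3) ∧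
      0 ≤ z.1 ∧ z.1 < width ∧ 0 ≤ z.2 ∧ z.2 < height))

theorem memB (width height : Int) (antennas : List (String × List (Int × Int))) (z : Int × Int) :
    z ∈ (antennas.foldl (fun s0 entry =>
      entry.2.foldl (fun s1 p =>
        entry.2.foldl (fun s2 q =>
          if p = q then s2
          else
            let cx := 2 * p.1 - q.1
            let cy := 2 * p.2 - q.2
            let s3 := if 0 ≤ cx ∧ cx < width ∧ 0 ≤ cy ∧ cy < height then PySem.Set.add s2 (cx, cy) else s2
            let tx := 2 * p.1 + q.1
            let ty := 2 * p.2 + q.2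
            if PySem.Int.mod tx 3 = 0 ∧ PySem.Int.mod ty 3 = 0 then
              let tx' := PySem.Int.floordiv tx 3
              let ty' := PySem.Int.floordiv ty 3
              if 0 ≤ tx' ∧ tx' < width ∧ 0 ≤ ty' ∧ ty' < height then PySem.Set.add s3 (tx', ty') else s3
            else s3)
          s1)
        s0)
      PySem.Set.empty) ↔ CondB width height antennas z := by
  have hq : ∀ (entry : String × List (Int × Int)) (p : Int × Int) (s : PySem.Set (Int × Int)) (q : Int × Int),
      z ∈ (if p = q then s
          else
            let cx := 2 * p.1 - q.1
            let cy := 2 * p.2 - q.2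
            let s3 := if 0 ≤ cx ∧ cx < width ∧ 0 ≤ cy ∧ cy < height then PySem.Set.add s (cx, cy) else s
            let tx := 2 * p.1 + q.1
            let ty := 2 * p.2 + q.2
            if PySem.Int.mod tx 3 = 0 ∧ PySem.Int.mod ty 3 = 0 then
              let tx' := PySem.Int.floordiv tx 3
              let ty' := PySem.Int.floordiv ty 3
              if 0 ≤ tx' ∧ tx' < width ∧ 0 ≤ ty' ∧ ty' < height then PySem.Set.add s3 (tx', ty') else s3
            else s3) ↔
      z ∈ s ∨ (p ≠ q ∧
        ((z = (2 * p.1 - q.1, 2 * p.2 - q.2) ∧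
            0 ≤ 2 * p.1 - q.1 ∧ 2 * p.1 - q.1 < width ∧ 0 ≤ 2 * p.2 - q.2 ∧ 2 * p.2 - q.2 < height) ∨
         (PySem.Int.mod (2 * p.1 + q.1) 3 = 0 ∧ PySem.Int.mod (2 * p.2 + q.2) 3 = 0 ∧
          z = (PySem.Int.floordiv (2 * p.1 + q.1) 3, PySem.Int.floordiv (2 * p.2 + q.2) 3) ∧
          0 ≤ PySem.Int.floordiv (2 * p.1 + q.1) 3 ∧ PySem.Int.floordiv (2 * p.1 + q.1) 3 < width ∧
          0 ≤ PySem.Int.floordiv (2 * p.2 + q.2) 3 ∧ PySem.Int.floordiv (2 * p.2 + q.2) 3 < height))) := by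
    intro entry p s q
    by_cases hpq : p = q
    · simp [hpq]
    · by_cases hm : PySem.Int.mod (2 * p.1 + q.1) 3 = 0 ∧ PySem.Int.mod (2 * p.2 + q.2) 3 = 0
      · simp only [hpq, if_false, hm.1, hm.2, and_self, if_true, true_and, mem_add_ite]
        tauto
      · simp only [hpq, if_false, hm, if_false, mem_add_ite]
        tauto
  have hp : ∀ (entry : String × List (Int × Int)) (s : PySem.Set (Int × Int)) (p : Int × Int),
      z ∈ entry.2.foldl (fun s2 q =>
          if p = q then s2
          else
            let cx := 2 * p.1 - q.1
            let cy := 2 * p.2 - q.2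
            let s3 := if 0 ≤ cx ∧ cx < width ∧ 0 ≤ cy ∧ cy < height then PySem.Set.add s2 (cx, cy) else s2
            let tx := 2 * p.1 + q.1
            let ty := 2 * p.2 + q.2
            if PySem.Int.mod tx 3 = 0 ∧ PySem.Int.mod ty 3 = 0 then
              let tx' := PySem.Int.floordiv tx 3
              let ty' := PySem.Int.floordiv ty 3
              if 0 ≤ tx' ∧ tx' < width ∧ 0 ≤ ty' ∧ ty' < height then PySem.Set.add s3 (tx', ty') else s3
            else s3) s ↔
      z ∈ s ∨ ∃ q ∈ entry.2, p ≠ q ∧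
        ((z = (2 * p.1 - q.1, 2 * p.2 - q.2) ∧
            0 ≤ 2 * p.1 - q.1 ∧ 2 * p.1 - q.1 < width ∧ 0 ≤ 2 * p.2 - q.2 ∧ 2 * p.2 - q.2 < height) ∨
         (PySem.Int.mod (2 * p.1 + q.1) 3 = 0 ∧ PySem.Int.mod (2 * p.2 + q.2) 3 = 0 ∧
          z = (PySem.Int.floordiv (2 * p.1 + q.1) 3, PySem.Int.floordiv (2 * p.2 + q.2) 3) ∧
          0 ≤ PySem.Int.floordiv (2 * p.1 + q.1) 3 ∧ PySem.Int.floordiv (2 * p.1 + q.1) 3 < width ∧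
          0 ≤ PySem.Int.floordiv (2 * p.2 + q.2) 3 ∧ PySem.Int.floordiv (2 * p.2 + q.2) 3 < height)) := by
    intro entry s p
    exact mem_foldl_step _ _ z _ (hq entry p) s
  have he : ∀ (s : PySem.Set (Int × Int)) (entry : String × List (Int × Int)),
      z ∈ entry.2.foldl (fun s1 p =>
        entry.2.foldl (fun s2 q =>
          if p = q then s2
          else
            let cx := 2 * p.1 - q.1
            let cy := 2 * p.2 - q.2
            let s3 := if 0 ≤ cx ∧ cx < width ∧ 0 ≤ cy ∧ cy < height then PySem.Set.add s2 (cx, cy) else s2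
            let tx := 2 * p.1 + q.1
            let ty := 2 * p.2 + q.2
            if PySem.Int.mod tx 3 = 0 ∧ PySem.Int.mod ty 3 = 0 then
              let tx' := PySem.Int.floordiv tx 3
              let ty' := PySem.Int.floordiv ty 3
              if 0 ≤ tx' ∧ tx' < width ∧ 0 ≤ ty' ∧ ty' < height then PySem.Set.add s3 (tx', ty') else s3
            else s3)
          s1) s ↔
      z ∈ s ∨ ∃ p ∈ entry.2, ∃ q ∈ entry.2, p ≠ q ∧
        ((z = (2 * p.1 - q.1, 2 * p.2 - q.2) ∧
            0 ≤ 2 * p.1 - q.1 ∧ 2 * p.1 - q.1 < width ∧ 0 ≤ 2 * p.2 - q.2 ∧ 2 * p.2 - q.2 < height) ∨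
         (PySem.Int.mod (2 * p.1 + q.1) 3 = 0 ∧ PySem.Int.mod (2 * p.2 + q.2) 3 = 0 ∧
          z = (PySem.Int.floordiv (2 * p.1 + q.1) 3, PySem.Int.floordiv (2 * p.2 + q.2) 3) ∧
          0 ≤ PySem.Int.floordiv (2 * p.1 + q.1) 3 ∧ PySem.Int.floordiv (2 * p.1 + q.1) 3 < width ∧
          0 ≤ PySem.Int.floordiv (2 * p.2 + q.2) 3 ∧ PySem.Int.floordiv (2 * p.2 + q.2) 3 < height)) := by
    intro s entry
    exact mem_foldl_step _ _ z _ (hp entry) s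
  rw [mem_foldl_step _ _ z _ he PySem.Set.empty]
  simp only [PySem.Set.empty]
  unfold CondB
  constructor
  · rintro (h | ⟨e, he', p, hp', q, hq', hpq, (⟨rfl, hb⟩ | ⟨hm1, hm2, rfl, hb⟩)⟩)
    · simp at h
    · exact ⟨e, he', p, hp', q, hq', hpq, Or.inl ⟨rfl, hb⟩⟩
    · exact ⟨e, he', p, hp', q, hq', hpq, Or.inr ⟨hm1, hm2, rfl, hb⟩⟩
  · rintro ⟨e, he', p, hp', q, hq', hpq, (⟨rfl, hb⟩ | ⟨hm1, hm2, rfl, hb⟩)⟩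
    · exact Or.inr ⟨e, he', p, hp', q, hq', hpq, Or.inl ⟨rfl, hb⟩⟩
    · exact Or.inr ⟨e, he', p, hp', q, hq', hpq, Or.inr ⟨hm1, hm2, rfl, hb⟩⟩

theorem cond_iff (width height : Int) (antennas : List (String × List (Int × Int))) (z : Int × Int) :
    (0 ≤ z.1 ∧ z.1 < width ∧ 0 ≤ z.2 ∧ z.2 < height ∧ CondA antennas z.1 z.2) ↔
    CondB width height antennas z := by
  have hmod : ∀ a : Int, PySem.Int.mod a 3 = a % 3 := fun a => PySem.Int.mod_eq_emod_of_pos (by norm_num)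
  have hdiv : ∀ a : Int, PySem.Int.floordiv a 3 = a / 3 := fun a => PySem.Int.floordiv_eq_ediv_of_pos (by norm_num)
  unfold CondA CondB
  constructor
  · rintro ⟨hx0, hxw, hy0, hyh, e, he, p, hp, hne, (hq | hq)⟩
    · refine ⟨e, he, p, hp, _, hq, ?_, Or.inl ⟨?_, hx0, hxw, hy0, hyh⟩⟩
      · intro h
        rw [Prod.ext_iff] at h
        exact hne (Prod.ext_iff.mpr ⟨by omega, by omega⟩)
      · exact Prod.ext_iff.mpr ⟨by simp; omega, by simp; omega⟩
    · refine ⟨e, he, p, hp, _, hq, ?_, Or.inr ⟨?_, ?_, ?_, hx0, hxw, hy0, hyh⟩⟩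
      · intro h
        rw [Prod.ext_iff] at h
        exact hne (Prod.ext_iff.mpr ⟨by omega, by omega⟩)
      · rw [hmod]; simp; omega
      · rw [hmod]; simp; omega
      · rw [hdiv, hdiv]
        exact Prod.ext_iff.mpr ⟨by simp; omega, by simp; omega⟩
  · rintro ⟨e, he, p, hp, q, hq, hpq, (⟨hz, hb⟩ | ⟨hm1, hm2, hz, hb⟩)⟩
    · obtain ⟨hx0, hxw, hy0, hyh⟩ := hb
      rw [Prod.ext_iff] at hz
      refine ⟨hx0, hxw, hy0, hyh, e, he, p, hp, ?_, Or.inl ?_⟩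
      · intro h
        rw [Prod.ext_iff] at h
        exact hpq (Prod.ext_iff.mpr ⟨by omega, by omega⟩)
      · have : (p.1 + (p.1 - z.1), p.2 + (p.2 - z.2)) = q := Prod.ext_iff.mpr ⟨by omega, by omega⟩
        rw [this]; exact hq
    · obtain ⟨hx0, hxw, hy0, hyh⟩ := hb
      rw [hmod] at hm1 hm2
      rw [hdiv, hdiv] at hz
      rw [Prod.ext_iff] at hz
      refine ⟨hx0, hxw, hy0, hyh, e, he, p, hp, ?_, Or.inr ?_⟩
      · intro h
        rw [Prod.ext_iff] at h
        exact hpq (Prod.ext_iff.mpr ⟨by omega, by omega⟩)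
      · have : (z.1 - 2 * (p.1 - z.1), z.2 - 2 * (p.2 - z.2)) = q := Prod.ext_iff.mpr ⟨by omega, by omega⟩
        rw [this]; exact hq

theorem nodup_foldl_step {β : Type} {α : Type} (l : List β)
    (step : List α → β → List α)
    (h : ∀ s b, s.Nodup → (step s b).Nodup) :
    ∀ s : List α, s.Nodup → (l.foldl step s).Nodup := by
  induction l with
  | nil => simp
  | cons b l ih => intro s hs; exact ih _ (h s b hs)

theorem ports_eq (width height : Int) (antennas : List (String × List (Int × Int))) :
    antinode_points_twice_distance width height antennas =
    antinode_points_twice_distance_alt width height antennas := by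
  simp only [antinode_points_twice_distance, antinode_points_twice_distance_alt]
  have hA : (((PySem.List.pyRange 0 width 1).foldl (fun s0 x =>
      (PySem.List.pyRange 0 height 1).foldl (fun s1 y =>
        antennas.foldl (fun s2 entry =>
          entry.2.foldl (fun s3 p =>
            if p = (x, y) then s3
            else
              let u := p.1
              let v := p.2
              let du := u - x
              let dv := v - y
              let s4 := if (u + du, v + dv) ∈ entry.2 then PySem.Set.add s3 (x, y) else s3
              if (x - 2 * du, y - 2 * dv) ∈ entry.2 then PySem.Set.add s4 (x, y) else s4)
            s2)
          s1)
        s0)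
      PySem.Set.empty) : List (Int × Int)).Nodup := by
    apply nodup_foldl_step
    · intro s x hs
      apply nodup_foldl_step
      · intro s y hs
        apply nodup_foldl_step
        · intro s e hs
          apply nodup_foldl_step
          · intro s p hs
            dsimp only
            split_ifs <;> (repeat apply PySem.Set.nodup_add) <;> exact hs
          · exact hs
        · exact hs
      · exact hs
    · exact List.nodup_nil
  have hB : ((antennas.foldl (fun s0 entry =>
      entry.2.foldl (fun s1 p =>
        entry.2.foldl (fun s2 q =>
          if p = q then s2
          else
            let cx := 2 * p.1 - q.1
            let cy := 2 * p.2 - q.2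
            let s3 := if 0 ≤ cx ∧ cx < width ∧ 0 ≤ cy ∧ cy < height then PySem.Set.add s2 (cx, cy) else s2
            let tx := 2 * p.1 + q.1
            let ty := 2 * p.2 + q.2
            if PySem.Int.mod tx 3 = 0 ∧ PySem.Int.mod ty 3 = 0 then
              let tx' := PySem.Int.floordiv tx 3
              let ty' := PySem.Int.floordiv ty 3
              if 0 ≤ tx' ∧ tx' < width ∧ 0 ≤ ty' ∧ ty' < height then PySem.Set.add s3 (tx', ty') else s3
            else s3)
          s1)
        s0)
      PySem.Set.empty) : List (Int × Int)).Nodup := by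
    apply nodup_foldl_step
    · intro s e hs
      apply nodup_foldl_step
      · intro s p hs
        apply nodup_foldl_step
        · intro s q hs
          dsimp only
          split_ifs <;> (repeat apply PySem.Set.nodup_add) <;> exact hs
        · exact hs
      · exact hs
    · exact List.nodup_nil
  have hperm := (List.perm_ext_iff_of_nodup hA hB).mpr (fun z =>
    (memA width height antennas z).trans ((cond_iff width height antennas z).trans
      (memB width height antennas z).symm).symm.symm)
  exact congrArg Int.ofNat hperm.length_eq

-- ===== VERDICT (by name: the statement is the Claim_ definition above) =====
theorem antinode_points_twice_distance_spec : Claim_equal_antinode_points_twice_distance := by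
  intro width height antennas _
  unfold Spec_antinode_points_twice_distance
  exact ports_eq width height antennas
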